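-- pv_equiv track=rewrite | github.com/R1013-T/AtCoder | contest/abs/abc088b/main.py | solve
-- ===== SOURCE A (Python) =====
-- def solve(N ,AArr):
--   Alice = []
--   Bob = []
--   for i in range(len(AArr)):
--     maxA = max(AArr)
--     if (i % 2 == 0):
--       Bob.append(maxA)
--     else:
--       Alice.append(maxA)
--     AArr.remove(maxA)
--
--     ans = sum(Bob) - sum(Alice)
--
--   return ans
-- ===== SOURCE B (Python) =====
-- def solve(N, AArr):
--     return sum(a if i % 2 == 0 else -a
--                for i, a in enumerate(sorted(AArr, reverse=True)))
-- ===== Notes on version B (the rewrite author's own statement) =====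
-- stated objective: faster
-- what changed: Replaces the quadratic repeated max()+remove() loop with one descending sort followed by a single alternating-sign sum.
import Mathlib
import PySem

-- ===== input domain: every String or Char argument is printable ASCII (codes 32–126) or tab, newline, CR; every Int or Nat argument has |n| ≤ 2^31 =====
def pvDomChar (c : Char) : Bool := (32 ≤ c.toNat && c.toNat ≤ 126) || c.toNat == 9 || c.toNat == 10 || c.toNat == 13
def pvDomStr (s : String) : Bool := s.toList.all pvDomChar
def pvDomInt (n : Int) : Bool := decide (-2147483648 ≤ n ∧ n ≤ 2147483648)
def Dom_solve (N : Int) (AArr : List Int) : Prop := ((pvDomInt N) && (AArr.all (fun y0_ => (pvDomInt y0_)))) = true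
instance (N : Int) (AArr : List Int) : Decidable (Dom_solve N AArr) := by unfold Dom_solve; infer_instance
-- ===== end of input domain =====

-- B replaces A's quadratic repeated max()+remove() loop by one descending sort and an
-- alternating-sign sum (asymptotically faster). A mutates AArr in place (remove); the
-- equivalence proved here is about the return value only — B does not mutate.


-- ===== PORT A =====
-- one iteration of A's for-loop: state = (Alice, Bob, AArr, ans)
def stepA (s : List Int × List Int × List Int × Int) (i : Int) :
    List Int × List Int × List Int × Int :=
  match PySem.List.max? s.2.2.1 (fun x => x) with
  | none => s        -- max([]) raises in Python; unreachable (arr is nonempty at every iteration)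
  | some m =>
    let alice := if PySem.Int.mod i 2 = 0 then s.1 else s.1 ++ [m]
    let bob := if PySem.Int.mod i 2 = 0 then s.2.1 ++ [m] else s.2.1
    match PySem.List.remove? s.2.2.1 m with
    | none => s      -- ValueError; unreachable (m ∈ arr)
    | some arr => (alice, bob, arr, bob.sum - alice.sum)

def solve (N : Int) (AArr : List Int) : Int :=
  ((PySem.List.pyRange 0 (AArr.length : Int) 1).foldl stepA ([], [], AArr, 0)).2.2.2

-- ===== PORT B =====
def solve_alt (N : Int) (AArr : List Int) : Int :=
  ((PySem.List.enumerate (PySem.List.sorted AArr (fun x => x) true) 0).map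
    (fun p => if PySem.Int.mod p.1 2 = 0 then p.2 else -p.2)).sum

-- ===== PRECONDITION & SPEC =====
-- Pre_ excludes only the empty list, on which A raises UnboundLocalError ('ans' never assigned).
def Pre_solve (N : Int) (AArr : List Int) : Prop := AArr ≠ []
instance (N : Int) (AArr : List Int) : Decidable (Pre_solve N AArr) := by unfold Pre_solve; infer_instance
def pvWitness_solve : Int × List Int := (3, [3, 1, 2])

def Spec_solve (N : Int) (AArr : List Int) (out : Int) : Prop := out = solve_alt N AArr
instance (N : Int) (AArr : List Int) (out : Int) : Decidable (Spec_solve N AArr out) := by unfold Spec_solve; infer_instance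

-- ===== CLAIM (what is proved, stated in full; the proofs are below) =====
def Claim_equal_solve : Prop := ∀ (N : Int) (AArr : List Int), Dom_solve N AArr → Pre_solve N AArr → Spec_solve N AArr (solve N AArr)

-- ===== LEMMAS AND PROOFS =====

-- alternating-sign sum of l, signs starting at index k (the body of solve_alt)
def altsum (k : Int) (l : List Int) : Int :=
  ((PySem.List.enumerate l k).map (fun p => if PySem.Int.mod p.1 2 = 0 then p.2 else -p.2)).sum

theorem altsum_nil (k : Int) : altsum k [] = 0 := rfl

theorem altsum_cons (k : Int) (x : Int) (t : List Int) :
    altsum k (x :: t) = (if PySem.Int.mod k 2 = 0 then x else -x) + altsum (k + 1) t := by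
  simp [altsum, PySem.List.enumerate_cons]

-- sorted descending = the (first) max, then sorted descending of the rest
theorem sd_max (xs : List Int) (m : Int)
    (hm : PySem.List.max? xs (fun x => x) = some m) :
    PySem.List.sorted xs (fun x => x) true =
      m :: PySem.List.sorted (xs.erase m) (fun x => x) true := by
  have hmem : m ∈ xs := PySem.List.max?_mem hm
  have hmax : ∀ y ∈ xs, y ≤ m := fun y hy => PySem.List.max?_isMax hm y hy
  apply PySem.List.eq_of_perm_of_pairwise_le_of_injective (fun x => -x) neg_injective
  · exact (PySem.List.sorted_perm xs _ true).trans
      ((List.perm_cons_erase hmem).trans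
        ((PySem.List.sorted_perm (xs.erase m) _ true).symm.cons m))
  · exact (PySem.List.sorted_pairwise_rev xs (fun x => x)).imp (by intro a b h; omega)
  · refine List.pairwise_cons.2 ⟨?_, ?_⟩
    · intro y hy
      have : y ∈ xs.erase m := (PySem.List.mem_sorted _ _ _ _).1 hy
      have := hmax y (List.mem_of_mem_erase this)
      omega
    · exact (PySem.List.sorted_pairwise_rev (xs.erase m) (fun x => x)).imp
        (by intro a b h; omega)

theorem loop_spec : ∀ (n : Nat) (arr alice bob : List Int) (k a : Int),
    arr.length = n → arr ≠ [] →
    ((PySem.List.pyRange k (k + (n : Int)) 1).foldl stepA (alice, bob, arr, a)).2.2.2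
      = bob.sum - alice.sum + altsum k (PySem.List.sorted arr (fun x => x) true) := by
  intro n
  induction n with
  | zero => intro arr _ _ _ _ hl hne; exact absurd (List.length_eq_zero_iff.mp hl) hne
  | succ n ih =>
    intro arr alice bob k a hl hne
    rw [show (((n + 1 : Nat)) : Int) = (n : Int) + 1 from by push_cast; ring]
    obtain ⟨m, hm⟩ : ∃ m, PySem.List.max? arr (fun x => x) = some m := by
      cases h : PySem.List.max? arr (fun x => x) with
      | none => exact absurd ((PySem.List.max?_eq_none_iff _ _).1 h) hne
      | some m => exact ⟨m, rfl⟩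
    have hmem : m ∈ arr := PySem.List.max?_mem hm
    have hrm : PySem.List.remove? arr m = some (arr.erase m) :=
      PySem.List.remove?_eq_some_erase arr m hmem
    have hk : k < k + ((n : Int) + 1) := by omega
    rw [PySem.List.pyRange_one_cons hk, List.foldl_cons]
    have hstep : stepA (alice, bob, arr, a) k =
        ((if PySem.Int.mod k 2 = 0 then alice else alice ++ [m]),
         (if PySem.Int.mod k 2 = 0 then bob ++ [m] else bob),
         arr.erase m,
         (if PySem.Int.mod k 2 = 0 then bob ++ [m] else bob).sum -
           (if PySem.Int.mod k 2 = 0 then alice else alice ++ [m]).sum) := by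
      simp [stepA, hm, hrm]
    rw [hstep, sd_max arr m hm, altsum_cons]
    have hlen : (arr.erase m).length = n := by
      have := List.length_erase_of_mem hmem; omega
    by_cases hnil : arr.erase m = []
    · have hn0 : n = 0 := by rw [hnil] at hlen; simpa using hlen.symm
      subst hn0
      rw [PySem.List.pyRange_one_eq_nil (by push_cast; omega), List.foldl_nil]
      rw [hnil, (PySem.List.sorted_eq_nil_iff _ _ _).2 rfl, altsum_nil]
      by_cases hpar : (2 : Int) ∣ k <;>
        simp [hpar, List.sum_append] <;> ring
    · have := ih (arr.erase m)
        (if PySem.Int.mod k 2 = 0 then alice else alice ++ [m])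
        (if PySem.Int.mod k 2 = 0 then bob ++ [m] else bob)
        (k + 1)
        ((if PySem.Int.mod k 2 = 0 then bob ++ [m] else bob).sum -
          (if PySem.Int.mod k 2 = 0 then alice else alice ++ [m]).sum) hlen hnil
      rw [show k + ((n : Int) + 1) = (k + 1) + (n : Int) from by ring, this]
      by_cases hpar : (2 : Int) ∣ k <;>
        simp [hpar, List.sum_append] <;> ring

-- ===== VERDICT (by name: the statement is the Claim_ definition above) =====
theorem solve_spec : Claim_equal_solve := by
  intro N AArr _ hpre
  unfold Spec_solve solve solve_alt
  have h := loop_spec AArr.length AArr [] [] 0 0 rfl hpre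
  rw [show (0 : Int) + (AArr.length : Int) = (AArr.length : Int) from by ring] at h
  rw [h]
  simp [altsum]
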